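-- pv_equiv track=rewrite | github.com/Avalanche-io/c4py | src/c4py/decoder.py | _is_flow_target
-- ===== SOURCE A (Python) =====
-- def _is_flow_target(s: str) -> bool:
--     """True if text matches flow target pattern: label followed by ':'."""
--     if not s or not s[0].isalpha():
--         return False
--     for i in range(1, len(s)):
--         c = s[i]
--         if c == ":":
--             return True
--         if c == " ":
--             return False
--         if not (c.isalnum() or c in ("_", "-")):
--             return False
--     return False
-- ===== SOURCE B (Python) =====
-- def _is_flow_target(s: str) -> bool:
--     i = s.find(':')
--     if i <= 0:
--         return False
--     label = s[:i]
--     return label[0].isalpha() and all(c.isalnum() or c in ('_', '-') for c in label[1:])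
-- ===== Notes on version B (the rewrite author's own statement) =====
-- stated objective: simpler
-- what changed: B locates the first colon with str.find, slices the label off and validates it as a unit (one isalpha check plus an all() over the rest), replacing A's interleaved char-by-char early-return scan with its separate colon/space/valid-char branches.
import Mathlib
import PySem

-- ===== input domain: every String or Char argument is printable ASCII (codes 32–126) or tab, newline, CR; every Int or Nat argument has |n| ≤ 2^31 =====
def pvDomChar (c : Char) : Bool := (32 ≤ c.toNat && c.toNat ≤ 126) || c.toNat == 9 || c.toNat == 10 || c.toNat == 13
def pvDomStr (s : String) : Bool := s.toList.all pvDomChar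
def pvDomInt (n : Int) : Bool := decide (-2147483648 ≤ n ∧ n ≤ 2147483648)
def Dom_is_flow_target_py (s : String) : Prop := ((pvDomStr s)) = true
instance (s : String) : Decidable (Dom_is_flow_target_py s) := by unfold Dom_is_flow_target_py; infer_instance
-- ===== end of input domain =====

-- B finds the first colon with str.find and validates the sliced-off label as a unit,
-- instead of A's interleaved char-by-char early-return scan. Objective: simpler.


-- ===== PORT A =====
-- the 'for i in range(1, len(s))' scan of A, transliterated over the remaining chars
def isFlowLoop : List Char → Bool
  | [] => false
  | c :: rest =>
    if c == ':' then true
    else if c == ' ' then false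
    else if !(PySem.Chars.isalnum c || c == '_' || c == '-') then false
    else isFlowLoop rest

def is_flow_target_py (s : String) : Bool :=
  match s.toList with
  | [] => false
  | c0 :: rest =>
    if !(PySem.Chars.isalpha c0) then false
    else isFlowLoop rest

-- ===== PORT B =====
def is_flow_target_py_alt (s : String) : Bool :=
  let i := PySem.Chars.find s.toList [':']
  if i ≤ 0 then false
  else
    let label := PySem.List.slice s.toList none (some i)
    match PySem.List.pyGet? label 0 with
    | none => false   -- unreachable: i > 0 makes label nonempty (Python would raise IndexError)
    | some c0 =>
      PySem.Chars.isalpha c0 &&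
        (PySem.List.slice label (some 1) none).all
          (fun c => PySem.Chars.isalnum c || c == '_' || c == '-')

-- ===== PRECONDITION & SPEC =====
def Spec_is_flow_target_py (s : String) (out : Bool) : Prop := out = is_flow_target_py_alt s
instance (s : String) (out : Bool) : Decidable (Spec_is_flow_target_py s out) := by unfold Spec_is_flow_target_py; infer_instance

-- ===== CLAIM (what is proved, stated in full; the proofs are below) =====
def Claim_equal_is_flow_target_py : Prop := ∀ (s : String), Dom_is_flow_target_py s → Spec_is_flow_target_py s (is_flow_target_py s)

-- ===== LEMMAS AND PROOFS =====

-- a char A's loop accepts between the first char and the colon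
def okChar (c : Char) : Bool := PySem.Chars.isalnum c || c == '_' || c == '-'

lemma isFlowLoop_of_no_colon (l : List Char) (h : ':' ∉ l) : isFlowLoop l = false := by
  induction l with
  | nil => rfl
  | cons c rest ih =>
    simp only [isFlowLoop]
    have hc : ¬ (c == ':') = true := by
      simp only [beq_iff_eq]; intro hce; exact h (hce ▸ List.mem_cons_self)
    rw [if_neg hc]
    split_ifs with h1 h2
    · rfl
    · rfl
    · exact ih (fun hm => h (List.mem_cons_of_mem _ hm))

lemma isFlowLoop_eq_take (l : List Char) (n : Nat) (hn : l[n]? = some ':')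
    (hmin : ∀ j < n, l[j]? ≠ some ':') :
    isFlowLoop l = (l.take n).all okChar := by
  induction l generalizing n with
  | nil => simp at hn
  | cons c rest ih =>
    cases n with
    | zero =>
      simp only [List.getElem?_cons_zero, Option.some.injEq] at hn
      simp [isFlowLoop, hn]
    | succ m =>
      have hc : c ≠ ':' := by
        intro hce
        exact hmin 0 (Nat.succ_pos m) (by simp [hce])
      simp only [List.getElem?_cons_succ] at hn
      have hmin' : ∀ j < m, rest[j]? ≠ some ':' := by
        intro j hj
        have := hmin (j + 1) (by omega)
        simpa using this
      simp only [isFlowLoop, List.take_succ_cons, List.all_cons]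
      rw [if_neg (by simp [hc])]
      have hcond : (PySem.Chars.isalnum c || c == '_' || c == '-') = okChar c := rfl
      rw [hcond]
      by_cases hok : okChar c = true
      · have hsp : ¬ (c == ' ') = true := by
          intro hsp; simp only [beq_iff_eq] at hsp; subst hsp
          exact absurd hok (by decide)
        rw [if_neg hsp, if_neg (by simp [hok]), ih m hn hmin', hok, Bool.true_and]
      · have hok' : okChar c = false := by simpa using hok
        rw [hok']
        simp

lemma singleton_prefix_iff (l : List Char) (c : Char) :
    [c] <+: l ↔ l[0]? = some c := by
  constructor
  · rintro ⟨t, ht⟩; subst ht; rfl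
  · intro h
    cases l with
    | nil => simp at h
    | cons a t =>
      simp only [List.getElem?_cons_zero, Option.some.injEq] at h
      exact ⟨t, by simp [h]⟩

-- ===== VERDICT (by name: the statement is the Claim_ definition above) =====
theorem is_flow_target_py_spec : Claim_equal_is_flow_target_py := by
  intro s _
  show is_flow_target_py s = is_flow_target_py_alt s
  unfold is_flow_target_py is_flow_target_py_alt
  generalize s.toList = l
  by_cases hle : PySem.Chars.find l [':'] ≤ 0
  · rw [if_pos hle]
    have hge : -1 ≤ PySem.Chars.find l [':'] := PySem.Chars.neg_one_le_find l [':']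
    interval_cases h : PySem.Chars.find l [':']
    · -- find = -1: no colon anywhere in the string
      have hnc : ¬ [':'] <:+: l := (PySem.Chars.find_eq_neg_one_iff l [':']).mp h
      have hmem : ':' ∉ l := by
        intro hm
        obtain ⟨s1, t1, hst⟩ := List.append_of_mem hm
        exact hnc ⟨s1, t1, by rw [hst]; simp⟩
      cases l with
      | nil => rfl
      | cons c0 rest =>
        show (if (!PySem.Chars.isalpha c0) = true then false else isFlowLoop rest) = false
        split_ifs with h0
        · rfl
        · exact isFlowLoop_of_no_colon rest
            (fun hm => hmem (List.mem_cons_of_mem _ hm))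
    · -- find = 0: the colon is the first character
      have hspec := PySem.Chars.find_spec
        (show (0:Int) ≤ PySem.Chars.find l [':'] by omega)
      rw [h] at hspec
      have h0 : l[0]? = some ':' := by
        have := (singleton_prefix_iff l ':').mp (by simpa using hspec.1)
        exact this
      cases l with
      | nil => simp at h0
      | cons c0 rest =>
        simp only [List.getElem?_cons_zero, Option.some.injEq] at h0
        subst h0
        show (if (!PySem.Chars.isalpha ':') = true then false else isFlowLoop rest) = false
        rw [if_pos (by decide)]
  · rw [if_neg hle]
    have hipos : 0 < PySem.Chars.find l [':'] := by omega
    have hspec := PySem.Chars.find_spec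
      (show (0:Int) ≤ PySem.Chars.find l [':'] by omega)
    set i := PySem.Chars.find l [':'] with hi
    have hcolon : l[i.toNat]? = some ':' := by
      have := (singleton_prefix_iff _ ':').mp hspec.1
      simpa using this
    have hmin : ∀ j < i.toNat, l[j]? ≠ some ':' := by
      intro j hj hjc
      exact hspec.2 j hj ((singleton_prefix_iff _ ':').mpr (by simpa using hjc))
    rw [PySem.List.slice_to l (by omega : (0:Int) ≤ i)]
    have hlen : i.toNat < l.length := by
      by_contra hge
      rw [List.getElem?_eq_none (by omega)] at hcolon
      simp at hcolon
    cases l with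
    | nil => simp at hlen
    | cons c0 rest =>
      have htake : (c0 :: rest).take i.toNat = c0 :: rest.take (i.toNat - 1) := by
        obtain ⟨m, hm⟩ : ∃ m, i.toNat = m + 1 := ⟨i.toNat - 1, by omega⟩
        rw [hm, List.take_succ_cons]
        simp
      rw [htake]
      have hget : PySem.List.pyGet? (c0 :: rest.take (i.toNat - 1)) 0 = some c0 := by
        simp [PySem.List.pyGet?, PySem.List.pyIdx?]
      simp only [hget]
      rw [PySem.List.slice_from _ (by omega : (0:Int) ≤ 1)]
      simp only [Int.toNat_one, List.drop_succ_cons, List.drop_zero]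
      show (if (!PySem.Chars.isalpha c0) = true then false else isFlowLoop rest) = _
      by_cases h0 : PySem.Chars.isalpha c0 = true
      · rw [if_neg (by simp [h0]), h0, Bool.true_and]
        have hc1 : rest[i.toNat - 1]? = some ':' := by
          have hsucc : i.toNat = (i.toNat - 1) + 1 := by omega
          rw [hsucc] at hcolon
          simpa using hcolon
        have hm1 : ∀ j < i.toNat - 1, rest[j]? ≠ some ':' := by
          intro j hj
          have := hmin (j + 1) (by omega)
          simpa using this
        have := isFlowLoop_eq_take rest (i.toNat - 1) hc1 hm1
        rw [this]
        rfl
      · rw [if_pos (by simp [h0])]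
        simp [h0]
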